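-- pv_equiv track=rewrite | github.com/MeerkatPerson/crypto-ctf | energy_saving/brauer_k.py | process_chain
-- ===== SOURCE A (Python) =====
-- from typing import List
--
-- def process_chain(chain: List[int]):
--
--     max: int = chain[0]
--
--     new_chain = [1]
--
--     for i in range(1, len(chain)):
--
--         if (chain[i] > max):
--             new_chain.append(chain[i])
--             max = chain[i]
--
--     return new_chain
-- ===== SOURCE B (Python) =====
-- def process_chain(chain):
--     # Two-pass decomposition: build the prefix-maximum table, then keep each
--     # element that strictly exceeds its predecessor's prefix maximum.
--     prefix = chain[:1]
--     for x in chain[1:]: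
--         prefix.append(max(prefix[-1], x))
--     return [1] + [b for a, b in zip(prefix, prefix[1:]) if b > a]
-- ===== Notes on version B (the rewrite author's own statement) =====
-- stated objective: alternative
-- what changed: Replaces the stateful running-max collecting loop by a two-pass table-then-filter decomposition: build the prefix-maximum list once, then keep the elements at strict new-maximum positions via zip of adjacent prefix maxima.
-- crash fix: On the empty list A raises IndexError (chain[0]); B returns [1]. — e.g. on process_chain([]): A raises IndexError, B returns [1]
import Mathlib
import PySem

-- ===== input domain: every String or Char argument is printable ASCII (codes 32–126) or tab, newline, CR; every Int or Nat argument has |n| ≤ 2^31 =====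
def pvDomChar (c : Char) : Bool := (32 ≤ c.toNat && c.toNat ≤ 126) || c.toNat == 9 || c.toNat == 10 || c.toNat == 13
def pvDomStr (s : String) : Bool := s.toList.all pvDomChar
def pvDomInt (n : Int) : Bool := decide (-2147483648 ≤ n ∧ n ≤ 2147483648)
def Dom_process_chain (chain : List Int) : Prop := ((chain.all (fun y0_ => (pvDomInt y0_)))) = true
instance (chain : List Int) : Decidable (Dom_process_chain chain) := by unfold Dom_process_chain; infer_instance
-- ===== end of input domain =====

-- B replaces A's stateful running-max loop by a prefix-maximum table plus an adjacent-pair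
-- filter pass (alternative decomposition, same cost); B returns [1] where A raises on [].

-- ===== PORT A =====
def process_chain (chain : List Int) : List Int :=
  match chain with
  | [] => []   -- chain[0] raises IndexError; excluded by Pre_
  | c0 :: _ =>
    ((PySem.List.pyRange 1 (chain.length : Int) 1).foldl
      (fun (st : Int × List Int) i =>
        let x := PySem.List.pyGetD chain i 0
        if x > st.1 then (x, st.2 ++ [x]) else st)
      (c0, [1])).2

-- ===== PORT B =====
def process_chain_alt (chain : List Int) : List Int :=
  let pfx := (PySem.List.slice chain (some 1) none).foldl
      (fun p x => p ++ [max (PySem.List.pyGetD p (-1) 0) x])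
      (PySem.List.slice chain none (some 1))
  [1] ++ ((pfx.zip (PySem.List.slice pfx (some 1) none)).filter
      (fun ab => ab.2 > ab.1)).map (·.2)

-- ===== PRECONDITION & SPEC =====
-- Pre_ excludes exactly the empty list, on which A raises IndexError at chain[0].
def Pre_process_chain (chain : List Int) : Prop := chain ≠ []
instance (chain : List Int) : Decidable (Pre_process_chain chain) := by unfold Pre_process_chain; infer_instance
def pvWitness_process_chain : List Int := [3, 1, 4, 1, 5]

-- On the empty list A raises IndexError (chain[0]); B returns [1].
def Raises_process_chain (chain : List Int) : Prop := chain = []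
instance (chain : List Int) : Decidable (Raises_process_chain chain) := by unfold Raises_process_chain; infer_instance
def pvRaiseWitness_process_chain : List Int := []
def pvRaiseWitnessOut_process_chain : List Int := [1]

def Spec_process_chain (chain : List Int) (out : List Int) : Prop := out = process_chain_alt chain
instance (chain : List Int) (out : List Int) : Decidable (Spec_process_chain chain out) := by unfold Spec_process_chain; infer_instance

-- ===== CLAIM (what is proved, stated in full; the proofs are below) =====
def Claim_equal_process_chain : Prop := ∀ (chain : List Int), Dom_process_chain chain → Pre_process_chain chain → Spec_process_chain chain (process_chain chain)
def Claim_raises_process_chain : Prop := (∀ (chain : List Int), Dom_process_chain chain → Raises_process_chain chain → ¬ Pre_process_chain chain) ∧ (Dom_process_chain (pvRaiseWitness_process_chain) ∧ Raises_process_chain (pvRaiseWitness_process_chain) ∧ process_chain_alt (pvRaiseWitness_process_chain) = pvRaiseWitnessOut_process_chain)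

-- ===== LEMMAS AND PROOFS =====

-- The list of strict new maxima of xs above the running maximum m (common spec of both passes).
def newMaxes (m : Int) : List Int → List Int
  | [] => []
  | x :: r => if x > m then x :: newMaxes x r else newMaxes m r

-- The prefix-maximum tail: running maxima of m over xs, one per element.
def pmax (m : Int) : List Int → List Int
  | [] => []
  | x :: r => max m x :: pmax (max m x) r

theorem foldA_eq (rest : List Int) : ∀ (m : Int) (acc : List Int),
    (rest.foldl (fun (st : Int × List Int) x =>
        if x > st.1 then (x, st.2 ++ [x]) else st) (m, acc)).2
      = acc ++ newMaxes m rest := by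
  induction rest with
  | nil => intro m acc; simp [newMaxes]
  | cons x r ih =>
    intro m acc
    by_cases h : x > m
    · simp [List.foldl_cons, h, ih, newMaxes]
    · simp [List.foldl_cons, h, ih, newMaxes]

theorem foldB_eq (rest : List Int) : ∀ (m : Int) (acc : List Int), acc ≠ [] →
    PySem.List.pyGetD acc (-1) 0 = m →
    rest.foldl (fun p x => p ++ [max (PySem.List.pyGetD p (-1) 0) x]) acc
      = acc ++ pmax m rest := by
  induction rest with
  | nil => intro m acc _ _; simp [pmax]
  | cons x r ih =>
    intro m acc hne hlast
    simp only [List.foldl_cons, hlast]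
    rw [ih (max m x) (acc ++ [max m x]) (by simp)
        (PySem.List.pyGetD_neg_one_append_singleton _ _ _)]
    simp [pmax]

theorem zip_filter_eq (rest : List Int) : ∀ (m : Int),
    (((m :: pmax m rest).zip (pmax m rest)).filter (fun ab => ab.2 > ab.1)).map (·.2)
      = newMaxes m rest := by
  induction rest with
  | nil => intro m; simp [pmax, newMaxes]
  | cons x r ih =>
    intro m
    by_cases h : x > m
    · have hmx : max m x = x := max_eq_right (le_of_lt h)
      simp [pmax, newMaxes, hmx, h, ih]
    · have hmx : max m x = m := max_eq_left (le_of_not_gt h)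
      simp [pmax, newMaxes, hmx, h, ih]

-- ===== VERDICT (by name: the statement is the Claim_ definition above) =====
theorem process_chain_spec : Claim_equal_process_chain := by
  intro chain _ hpre
  unfold Spec_process_chain process_chain process_chain_alt
  match chain with
  | [] => exact absurd rfl hpre
  | c0 :: rest =>
    simp only
    rw [PySem.List.foldl_pyRange_pyGetD' (xs := c0 :: rest) (d := 0)
        (f := fun (st : Int × List Int) x => if x > st.1 then (x, st.2 ++ [x]) else st)
        (init := (c0, [1])) (a := 1) (by omega)]
    simp only [Int.toNat_one, List.drop_one, List.tail_cons]
    rw [foldA_eq]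
    have h0 : PySem.List.slice (c0 :: rest) none (some 1) = [c0] := by simp [pysem]
    have h1 : PySem.List.slice (c0 :: rest) (some 1) none = rest := by
      rw [PySem.List.slice_from_one]; rfl
    rw [h0, h1, foldB_eq rest c0 [c0] (by simp) (by simp [pysem]),
        PySem.List.slice_from_one]
    simp only [List.singleton_append, List.tail_cons]
    rw [zip_filter_eq]

@[simp] theorem process_chain_raises : Claim_raises_process_chain := by
  unfold Claim_raises_process_chain
  exact ⟨fun chain _ hr hp => hp hr, by decide⟩
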